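-- pv_equiv track=rewrite | github.com/seokhwan-an/study-algorithm | 프로그래머스/2/389479. 서버 증설 횟수/서버 증설 횟수.py | solution
-- ===== SOURCE A (Python) =====
-- def solution(players, m, k):
--     answer = 0
--     cover = [0] * len(players)
--     for i in range(len(players)):
--         if players[i] == 0 or players[i] < m or players[i] <= cover[i]:
--             continue
--
--         if cover[i] <= players[i]:
--             diff = players[i] - cover[i]
--             answer += diff // m
--
--             for j in range(i, min(len(players), i + k)):
--                 cover[j] += m * (diff // m)
--
--     return answer
-- ===== SOURCE B (Python) =====
-- def solution(players, m, k):
--     n = len(players)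
--     answer = 0
--     expire = [0] * (n + 1)  # expire[t] = total coverage that stops applying at hour t
--     cur = 0                 # running coverage at the current hour
--     for i in range(n):
--         cur += expire[i]
--         p = players[i]
--         if p != 0 and p >= m and p > cur:
--             need = (p - cur) // m
--             answer += need
--             if k > 1:
--                 add = m * need
--                 cur += add
--                 e = i + k if i + k < n else n
--                 expire[e] -= add
--     return answer
-- ===== Notes on version B (the rewrite author's own statement) =====
-- stated objective: faster
-- what changed: A re-paints the next k entries of a cover array on every expansion (O(n*k)); B keeps a running coverage sum plus an expiry (difference) array, doing O(1) work per hour.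
-- outside the precondition, e.g. on solution([3], 0, 2): A raises ZeroDivisionError, B raises ZeroDivisionError
import Mathlib
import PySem

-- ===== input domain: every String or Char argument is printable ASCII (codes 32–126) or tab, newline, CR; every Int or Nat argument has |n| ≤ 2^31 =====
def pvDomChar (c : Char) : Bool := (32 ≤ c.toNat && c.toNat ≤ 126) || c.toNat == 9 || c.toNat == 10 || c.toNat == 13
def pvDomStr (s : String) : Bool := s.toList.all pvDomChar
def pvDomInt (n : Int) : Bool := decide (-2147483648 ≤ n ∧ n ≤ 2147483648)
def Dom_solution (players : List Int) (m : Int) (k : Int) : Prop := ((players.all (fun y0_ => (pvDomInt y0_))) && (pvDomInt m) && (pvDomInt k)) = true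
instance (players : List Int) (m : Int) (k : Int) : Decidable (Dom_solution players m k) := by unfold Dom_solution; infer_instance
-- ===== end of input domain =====

-- B replaces A's O(n*k) re-painting of the cover window by a running coverage sum with a
-- difference (expiry) array, one O(1) update per hour; same return value on all of Pre_.

-- ===== PORT A =====
-- loop body of A's 'for i in range(len(players))', kept as a named helper
def solutionStepA (players : List Int) (m : Int) (k : Int) (st : Int × List Int) (i : Int) : Int × List Int :=
  let p := PySem.List.pyGetD players i 0
  let c := PySem.List.pyGetD st.2 i 0
  if p = 0 ∨ p < m ∨ p ≤ c then st
  else if c ≤ p then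
    let q := PySem.Int.floordiv (p - c) m
    ( st.1 + q,
      (PySem.List.pyRange i (min (players.length : Int) (i + k)) 1).foldl
        (fun cov j => PySem.List.pySetD cov j (PySem.List.pyGetD cov j 0 + m * q)) st.2 )
  else st

def solution (players : List Int) (m : Int) (k : Int) : Int :=
  ((PySem.List.pyRange 0 (players.length : Int) 1).foldl (solutionStepA players m k)
    (0, List.replicate players.length 0)).1

-- ===== PORT B =====
-- loop body of B's 'for i in range(n)', kept as a named helper
def solutionStepB (players : List Int) (m : Int) (k : Int) (st : Int × Int × List Int) (i : Int) : Int × Int × List Int :=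
  let cur := st.2.1 + PySem.List.pyGetD st.2.2 i 0
  let p := PySem.List.pyGetD players i 0
  if p ≠ 0 ∧ m ≤ p ∧ cur < p then
    let need := PySem.Int.floordiv (p - cur) m
    if 1 < k then
      let add := m * need
      let e := if i + k < (players.length : Int) then i + k else (players.length : Int)
      (st.1 + need, cur + add, PySem.List.pySetD st.2.2 e (PySem.List.pyGetD st.2.2 e 0 - add))
    else (st.1 + need, cur, st.2.2)
  else (st.1, cur, st.2.2)

def solution_alt (players : List Int) (m : Int) (k : Int) : Int :=
  ((PySem.List.pyRange 0 (players.length : Int) 1).foldl (solutionStepB players m k)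
    (0, 0, List.replicate (players.length + 1) 0)).1

-- ===== PRECONDITION & SPEC =====
-- Pre_ excludes exactly the inputs where Python A raises ZeroDivisionError (m = 0 with some
-- positive player); B raises the same exception there, so nothing returnable is excluded.
def Pre_solution (players : List Int) (m : Int) (k : Int) : Prop :=
  m ≠ 0 ∨ ∀ p ∈ players, p ≤ 0

instance (players : List Int) (m : Int) (k : Int) : Decidable (Pre_solution players m k) := by
  unfold Pre_solution; infer_instance

def pvWitness_solution : List Int × Int × Int := ([3, 1, 4, 0, 6], 2, 2)

def Spec_solution (players : List Int) (m : Int) (k : Int) (out : Int) : Prop := out = solution_alt players m k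
instance (players : List Int) (m : Int) (k : Int) (out : Int) : Decidable (Spec_solution players m k out) := by unfold Spec_solution; infer_instance

-- ===== CLAIM (what is proved, stated in full; the proofs are below) =====
def Claim_equal_solution : Prop := ∀ (players : List Int) (m : Int) (k : Int), Dom_solution players m k → Pre_solution players m k → Spec_solution players m k (solution players m k)

-- ===== LEMMAS AND PROOFS =====

-- prefix sum of the expiry array (proof-only helper)
def pvP (e : List Int) (r : Nat) : Int := ∑ s ∈ Finset.range r, e.getD s 0

lemma pvP_succ (e : List Int) (r : Nat) : pvP e (r + 1) = pvP e r + e.getD r 0 := by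
  simp [pvP, Finset.sum_range_succ]

lemma getD_set_eq_ite (e : List Int) (j : Nat) (v : Int) (hj : j < e.length) (s : Nat) :
    (e.set j v).getD s 0 = if s = j then v else e.getD s 0 := by
  rw [List.getD, List.getD, List.getElem?_set]
  by_cases h : j = s
  · subst h; simp [hj]
  · simp [h, Ne.symm h]

lemma pvP_set (e : List Int) (j : Nat) (v : Int) (hj : j < e.length) (r : Nat) :
    pvP (e.set j v) r = pvP e r + (if j < r then v - e.getD j 0 else 0) := by
  induction r with
  | zero => simp [pvP]
  | succ r ih =>
    rw [pvP_succ, pvP_succ, ih, getD_set_eq_ite e j v hj r]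
    split_ifs with h1 h2 <;> simp_all <;> omega

lemma innerFold_spec (v : Int) :
    ∀ (fuel j : Nat) (b : Int) (c : List Int), (b - (j : Int)).toNat = fuel → b ≤ (c.length : Int) →
      (((PySem.List.pyRange (j : Int) b 1).foldl
          (fun cov t => PySem.List.pySetD cov t (PySem.List.pyGetD cov t 0 + v)) c).length = c.length ∧
       ∀ t : Nat, ((PySem.List.pyRange (j : Int) b 1).foldl
          (fun cov t => PySem.List.pySetD cov t (PySem.List.pyGetD cov t 0 + v)) c).getD t 0
          = c.getD t 0 + (if j ≤ t ∧ (t : Int) < b then v else 0)) := by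
  intro fuel
  induction fuel with
  | zero =>
    intro j b c hf _
    rw [PySem.List.pyRange_one_eq_nil (by omega)]
    refine ⟨rfl, fun t => ?_⟩
    rw [if_neg (by omega : ¬ (j ≤ t ∧ (t : Int) < b))]
    simp
  | succ fuel ih =>
    intro j b c hf hb
    have hjb : (j : Int) < b := by omega
    rw [PySem.List.pyRange_one_cons hjb]
    simp only [List.foldl_cons]
    have hcast : (j : Int) + 1 = ((j + 1 : Nat) : Int) := by push_cast; ring
    set c1 := PySem.List.pySetD c (j : Int) (PySem.List.pyGetD c (j : Int) 0 + v) with hc1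
    have hlen1 : c1.length = c.length := by
      simp [hc1, PySem.List.pySetD_natCast]
    have hjlt : j < c.length := by omega
    obtain ⟨hl, hg⟩ := ih (j + 1) b c1 (by omega) (by omega)
    rw [hcast]
    refine ⟨by rw [hl, hlen1], fun t => ?_⟩
    rw [hg t]
    have hc1g : c1.getD t 0 = if t = j then c.getD j 0 + v else c.getD t 0 := by
      rw [hc1]
      simp only [PySem.List.pySetD_natCast, PySem.List.pyGetD_natCast]
      exact getD_set_eq_ite c j _ hjlt t
    rw [hc1g]
    by_cases ht : t = j
    · subst ht
      have h2 : (t ≤ t ∧ (t : Int) < b) := by omega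
      simp [h2]
    · rw [if_neg ht]
      by_cases hcnd : j ≤ t ∧ (t : Int) < b
      · rw [if_pos hcnd, if_pos (by omega : j + 1 ≤ t ∧ (t : Int) < b)]
      · rw [if_neg hcnd, if_neg (by omega : ¬ (j + 1 ≤ t ∧ (t : Int) < b))]

lemma loop_eq (players : List Int) (m k : Int) :
    ∀ (fuel idx : Nat) (ansA : Int) (cA : List Int) (ansB curB : Int) (eB : List Int),
      players.length - idx = fuel → idx ≤ players.length →
      cA.length = players.length → eB.length = players.length + 1 →
      ansA = ansB →
      (∀ t : Nat, idx ≤ t → t < players.length →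
        cA.getD t 0 = curB + pvP eB (t + 1) - pvP eB idx) →
      ((PySem.List.pyRange (idx : Int) (players.length : Int) 1).foldl
          (solutionStepA players m k) (ansA, cA)).1
      = ((PySem.List.pyRange (idx : Int) (players.length : Int) 1).foldl
          (solutionStepB players m k) (ansB, curB, eB)).1 := by
  intro fuel
  induction fuel with
  | zero =>
    intro idx ansA cA ansB curB eB hf hidx _ _ hans _
    rw [PySem.List.pyRange_one_eq_nil (by omega)]
    simpa using hans
  | succ fuel ih =>
    intro idx ansA cA ansB curB eB hf hidx hcl hel hans hinv
    have hlt : idx < players.length := by omega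
    rw [PySem.List.pyRange_one_cons (by omega : (idx : Int) < (players.length : Int))]
    simp only [List.foldl_cons]
    have hcast : (idx : Int) + 1 = ((idx + 1 : Nat) : Int) := by push_cast; ring
    have hcur : curB + eB.getD idx 0 = cA.getD idx 0 := by
      rw [hinv idx le_rfl hlt, pvP_succ]; ring
    set p := players.getD idx 0 with hp
    set c := cA.getD idx 0 with hc
    have hcrel : c = curB + pvP eB (idx + 1) - pvP eB idx := by
      rw [← hcur, pvP_succ]; ring
    simp only [solutionStepA, solutionStepB, PySem.List.pyGetD_natCast, ← hp, ← hc]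
    rw [hcur]
    by_cases hcond : p = 0 ∨ p < m ∨ p ≤ c
    · rw [if_pos hcond, if_neg (by omega : ¬ (p ≠ 0 ∧ m ≤ p ∧ c < p)), hcast]
      exact ih (idx + 1) ansA cA ansB c eB (by omega) (by omega) hcl hel hans
        (fun t h1 h2 => by rw [hinv t (by omega) h2, hcrel]; ring)
    · rw [if_neg hcond, if_pos (by omega : c ≤ p),
        if_pos (by omega : p ≠ 0 ∧ m ≤ p ∧ c < p), hcast]
      set q := PySem.Int.floordiv (p - c) m with hq
      by_cases hk : 1 < k
      · rw [if_pos hk]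
        obtain ⟨eN, hmin, hie, hen⟩ :
            ∃ eN : Nat, ((eN : Int) = min (players.length : Int) ((idx : Int) + k)
              ∧ idx < eN ∧ eN ≤ players.length) :=
          ⟨(min (players.length : Int) ((idx : Int) + k)).toNat, by omega, by omega, by omega⟩
        rw [show (if (idx : Int) + k < (players.length : Int) then (idx : Int) + k
              else (players.length : Int)) = (eN : Int) by omega]
        rw [show min (players.length : Int) ((idx : Int) + k) = (eN : Int) from hmin.symm]
        simp only [PySem.List.pySetD_natCast, PySem.List.pyGetD_natCast]
        obtain ⟨hflen, hfget⟩ := innerFold_spec (m * q) (((eN : Int) - (idx : Int)).toNat)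
          idx (eN : Int) cA rfl (by omega)
        refine ih (idx + 1) (ansA + q) _ (ansB + q) (c + m * q)
          (eB.set eN (eB.getD eN 0 - m * q)) (by omega) (by omega)
          (by rw [hflen, hcl]) (by rw [List.length_set, hel]) (by rw [hans]) ?_
        intro t h1 h2
        rw [hfget t, hinv t (by omega) h2,
          pvP_set eB eN _ (by omega) (t + 1), pvP_set eB eN _ (by omega) (idx + 1),
          if_neg (by omega : ¬ eN < idx + 1), hcrel]
        rcases Nat.lt_or_ge t eN with h | h
        · rw [if_pos (⟨by omega, by omega⟩ : idx ≤ t ∧ (t : Int) < (eN : Int)),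
            if_neg (by omega : ¬ eN < t + 1)]
          ring
        · rw [if_neg (by omega : ¬ (idx ≤ t ∧ (t : Int) < (eN : Int))),
            if_pos (by omega : eN < t + 1)]
          ring
      · rw [if_neg hk]
        obtain ⟨hflen, hfget⟩ := innerFold_spec (m * q)
          ((min (players.length : Int) ((idx : Int) + k) - (idx : Int)).toNat)
          idx (min (players.length : Int) ((idx : Int) + k)) cA rfl (by omega)
        refine ih (idx + 1) (ansA + q) _ (ansB + q) c eB (by omega) (by omega)
          (by rw [hflen, hcl]) hel (by rw [hans]) ?_
        intro t h1 h2
        rw [hfget t,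
          if_neg (by omega : ¬ (idx ≤ t ∧ (t : Int) < min (players.length : Int) ((idx : Int) + k))),
          hinv t (by omega) h2, hcrel]
        ring

-- ===== VERDICT (by name: the statement is the Claim_ definition above) =====
theorem solution_spec : Claim_equal_solution := by
  intro players m k _ _
  unfold Spec_solution solution solution_alt
  have h0 : ((0 : Int)) = ((0 : Nat) : Int) := rfl
  rw [h0]
  exact loop_eq players m k players.length 0 0 (List.replicate players.length 0) 0 0
    (List.replicate (players.length + 1) 0) (by omega) (by omega) (by simp) (by simp) rfl
    (by intro t _ ht; simp [pvP])
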